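-- pv_equiv track=rewrite | github.com/justinforbes/refinery | refinery/lib/scripts/js/lexer.py | decode_js_string_body
-- ===== SOURCE A (Python) =====
-- _ESCAPE_MAP: dict[str, str] = {
--     'b'  : '\b',
--     'f'  : '\f',
--     'n'  : '\n',
--     'r'  : '\r',
--     't'  : '\t',
--     'v'  : '\v',
--     '0'  : '\0',
--     '\\' : '\\',
--     "'"  : "'",
--     '"'  : '"',
--     '`'  : '`',
-- }
--
-- _HEX = frozenset('0123456789abcdefABCDEF')
--
-- def _decode_one_escape(src: str, pos: int, length: int) -> tuple[str, int]:
--     if pos >= length: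
--         return '', pos
--     c = src[pos]
--     pos += 1
--     mapped = _ESCAPE_MAP.get(c)
--     if mapped is not None:
--         return mapped, pos
--     if c == 'x' and pos + 1 < length:
--         hexstr = src[pos:pos + 2]
--         if len(hexstr) == 2 and _HEX.issuperset(hexstr):
--             return chr(int(hexstr, 16)), pos + 2
--         return 'x', pos
--     if c == 'u':
--         if pos < length and src[pos] == '{':
--             end = src.find('}', pos + 1)
--             if end != -1:
--                 hexstr = src[pos + 1:end]
--                 if hexstr and _HEX.issuperset(hexstr):
--                     return chr(int(hexstr, 16)), end + 1
--                 return 'u', end + 1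
--         elif pos + 3 < length:
--             hexstr = src[pos:pos + 4]
--             if len(hexstr) == 4 and _HEX.issuperset(hexstr):
--                 return chr(int(hexstr, 16)), pos + 4
--         return 'u', pos
--     if c in '\r\n':
--         if c == '\r' and pos < length and src[pos] == '\n':
--             pos += 1
--         return '', pos
--     return c, pos
--
-- def decode_js_string_body(text: str) -> str:
--     if '\\' not in text:
--         return text
--     parts: list[str] = []
--     i = 0
--     length = len(text)
--     while i < length:
--         c = text[i]
--         if c != '\\' or i + 1 >= length:
--             parts.append(c)
--             i += 1
--             continue
--         decoded, i = _decode_one_escape(text, i + 1, length)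
--         if decoded:
--             parts.append(decoded)
--     return ''.join(parts)
-- ===== SOURCE B (Python) =====
-- import re
--
-- _SIMPLE = {
--     'b': '\b', 'f': '\f', 'n': '\n', 'r': '\r', 't': '\t', 'v': '\v',
--     '0': '\0', '\\': '\\', "'": "'", '"': '"', '`': '`',
-- }
--
-- _HEXDIGITS = '0123456789abcdefABCDEF'
--
-- # One regex over all escape forms, tried in this priority order; a lone
-- # trailing backslash matches no alternative and stays as-is.
-- _RX = re.compile(
--     r"""\\(?:
--         (?P<simple>[bfnrtv0\\'"`])
--       | (?P<cont>\r\n|\r|\n)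
--       | x(?P<hex2>[0-9a-fA-F]{2})
--       | u\{(?P<brace>[^}]*)\}
--       | u(?P<hex4>[0-9a-fA-F]{4})
--       | (?P<other>.)
--     )""",
--     re.VERBOSE | re.DOTALL,
-- )
--
-- def _repl(m: "re.Match[str]") -> str:
--     g = m.group('simple')
--     if g is not None:
--         return _SIMPLE[g]
--     if m.group('cont') is not None:
--         return ''
--     g = m.group('hex2')
--     if g is not None:
--         return chr(int(g, 16))
--     g = m.group('brace')
--     if g is not None:
--         if g and all(ch in _HEXDIGITS for ch in g):
--             return chr(int(g, 16))
--         return 'u'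
--     g = m.group('hex4')
--     if g is not None:
--         return chr(int(g, 16))
--     return m.group('other')
--
-- def decode_js_string_body(text: str) -> str:
--     if '\\' not in text:
--         return text
--     return _RX.sub(_repl, text)
-- ===== Notes on version B (the rewrite author's own statement) =====
-- stated objective: idiomatic
-- what changed: Replaces the hand-written index-based scanner with its per-character escape dispatcher by one compiled regex alternating over all escape forms and a single re.sub replacement callback.
-- outside the precondition, e.g. on decode_js_string_body('\\u{110000}'): A raises ValueError, B raises ValueError; on decode_js_string_body('\\\\u{110000}'): A returns '\\u{110000}', B returns '\\u{110000}'
import Mathlib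
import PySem

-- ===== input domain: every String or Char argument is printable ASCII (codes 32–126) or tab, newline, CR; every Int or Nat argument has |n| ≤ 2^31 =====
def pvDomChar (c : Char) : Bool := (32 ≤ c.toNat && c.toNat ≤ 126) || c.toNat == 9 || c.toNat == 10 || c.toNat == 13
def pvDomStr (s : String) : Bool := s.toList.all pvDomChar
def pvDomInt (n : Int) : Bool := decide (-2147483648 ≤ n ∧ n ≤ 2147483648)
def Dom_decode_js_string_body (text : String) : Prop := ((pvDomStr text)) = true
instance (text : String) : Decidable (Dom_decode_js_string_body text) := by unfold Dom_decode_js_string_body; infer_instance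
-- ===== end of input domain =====

-- B replaces A's hand-written index scanner + escape dispatcher by one compiled regex with a
-- re.sub replacement callback (idiomatic); return values agree on Pre_ (which excludes only
-- \u escapes denoting surrogates or code points > 0x10FFFF, where Python A raises ValueError
-- or returns a non-scalar string not representable as a Lean String).

-- ===== PORT A =====

-- _ESCAPE_MAP
def pvEscMap : PySem.Dict String String :=
  PySem.Dict.ofList [("b", "\x08"), ("f", "\x0C"), ("n", "\n"), ("r", "\x0D"),
                     ("t", "\t"), ("v", "\x0B"), ("0", "\x00"), ("\\", "\\"),
                     ("'", "'"), ("\"", "\""), ("`", "`")]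

-- _HEX (frozenset of hex digit characters, kept as the distinct elements in order)
def pvHex : List Char := "0123456789abcdefABCDEF".toList

-- int(hexstr, 16): exact for the all-hex-digit strings A applies it to
def pvHexDigitVal (c : Char) : Nat :=
  if c.toNat ≤ 57 then c.toNat - 48 else if c.toNat ≤ 70 then c.toNat - 55 else c.toNat - 87

def pvHexVal (s : List Char) : Nat := s.foldl (fun a c => 16 * a + pvHexDigitVal c) 0

-- chr(n) is ported as Char.ofNat n: exact for Unicode scalar values, which Pre_ guarantees
-- (elsewhere Python's chr raises, or yields a lone surrogate that is no Lean Char).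
-- _decode_one_escape; src[pos] under its bounds guards is PySem.List.pyGetD (always in range there)
def pvDecodeOne (src : List Char) (pos : Int) (length : Int) : String × Int :=
  if length ≤ pos then ("", pos) else
  let c := PySem.List.pyGetD src pos ' '
  let pos := pos + 1
  match pvEscMap.get? (String.ofList [c]) with
  | some mapped => (mapped, pos)
  | none =>
    if c = 'x' ∧ pos + 1 < length then
      let hexstr := PySem.List.slice src (some pos) (some (pos + 2))
      if hexstr.length = 2 ∧ hexstr.all (fun ch => pvHex.contains ch) then
        (String.ofList [Char.ofNat (pvHexVal hexstr)], pos + 2)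
      else ("x", pos)
    else if c = 'u' then
      if pos < length ∧ PySem.List.pyGetD src pos ' ' = '{' then
        let e := PySem.Chars.findFrom src ['}'] (pos + 1) none
        if e ≠ -1 then
          let hexstr := PySem.List.slice src (some (pos + 1)) (some e)
          if hexstr ≠ [] ∧ hexstr.all (fun ch => pvHex.contains ch) then
            (String.ofList [Char.ofNat (pvHexVal hexstr)], e + 1)
          else ("u", e + 1)
        else ("u", pos)
      else if pos + 3 < length then
        let hexstr := PySem.List.slice src (some pos) (some (pos + 4))
        if hexstr.length = 4 ∧ hexstr.all (fun ch => pvHex.contains ch) then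
          (String.ofList [Char.ofNat (pvHexVal hexstr)], pos + 4)
        else ("u", pos)
      else ("u", pos)
    else if c = '\x0D' ∨ c = '\n' then
      if c = '\x0D' ∧ pos < length ∧ PySem.List.pyGetD src pos ' ' = '\n' then ("", pos + 1)
      else ("", pos)
    else (String.ofList [c], pos)

-- the while loop of decode_js_string_body (fuel = total length makes it total; each step advances i)
def pvLoopA (text : List Char) (length : Int) : Nat → Int → List String → List String
  | 0, _, parts => parts
  | fuel + 1, i, parts =>
    if i < length then
      let c := PySem.List.pyGetD text i ' '
      if c ≠ '\\' ∨ length ≤ i + 1 then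
        pvLoopA text length fuel (i + 1) (parts ++ [String.ofList [c]])
      else
        let r := pvDecodeOne text (i + 1) length
        pvLoopA text length fuel r.2 (if r.1 ≠ "" then parts ++ [r.1] else parts)
    else parts

def decode_js_string_body (text : String) : String :=
  if PySem.Str.isIn "\\" text = false then text
  else String.join (pvLoopA text.toList (text.toList.length : Int) text.toList.length 0 [])

-- ===== PORT B =====
-- Hand port of Source B's compiled regex + re.sub (no regex engine in Lean; exact on all inputs):
-- pvMatchRepl tries the alternatives of _RX in order at a position whose char is '\\' and
-- returns the _repl callback's replacement together with the number of chars consumed after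
-- the backslash; pvSubLoop is re.sub's left-to-right scan.

-- the character class [bfnrtv0\\'"`] together with the _SIMPLE lookup of _repl
def pvSimpleRepl (c : Char) : Option String :=
  if c = 'b' then some "\x08" else if c = 'f' then some "\x0C"
  else if c = 'n' then some "\n" else if c = 'r' then some "\x0D"
  else if c = 't' then some "\t" else if c = 'v' then some "\x0B"
  else if c = '0' then some "\x00" else if c = '\\' then some "\\"
  else if c = '\'' then some "'" else if c = '"' then some "\""
  else if c = '`' then some "`" else none

-- the character class [0-9a-fA-F] / membership in _HEXDIGITS
def pvHexClassB : List Char := "0123456789abcdefABCDEF".toList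

def pvIsHexB (c : Char) : Bool := pvHexClassB.contains c

def pvMatchRepl : List Char → Option (String × Nat)
  | [] => none            -- lone trailing backslash: no alternative matches
  | c :: rest =>
    match pvSimpleRepl c with
    | some m => some (m, 1)
    | none =>
      if c = '\x0D' then                    -- (?P<cont>\r\n|\r|\n) → ''
        match rest with
        | '\n' :: _ => some ("", 2)
        | _ => some ("", 1)
      else if c = '\n' then some ("", 1)
      else if c = 'x' then                  -- x(?P<hex2>[0-9a-fA-F]{2}) → chr
        match rest with
        | h1 :: h2 :: _ =>
          if pvIsHexB h1 ∧ pvIsHexB h2 then some (String.ofList [Char.ofNat (pvHexVal [h1, h2])], 3)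
          else some ("x", 1)                -- falls through to (?P<other>.)
        | _ => some ("x", 1)
      else if c = 'u' then
        match rest with
        | '{' :: r =>                       -- u\{(?P<brace>[^}]*)\}
          let content := r.takeWhile (fun ch => ch ≠ '}')
          if content.length < r.length then -- the closing '}' exists
            if content ≠ [] ∧ content.all pvIsHexB then
              some (String.ofList [Char.ofNat (pvHexVal content)], content.length + 3)
            else some ("u", content.length + 3)
          else some ("u", 1)                -- unclosed: brace and hex4 fail, (?P<other>.) eats 'u'
        | h1 :: h2 :: h3 :: h4 :: _ =>      -- u(?P<hex4>[0-9a-fA-F]{4}) → chr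
          if pvIsHexB h1 ∧ pvIsHexB h2 ∧ pvIsHexB h3 ∧ pvIsHexB h4 then
            some (String.ofList [Char.ofNat (pvHexVal [h1, h2, h3, h4])], 5)
          else some ("u", 1)
        | _ => some ("u", 1)
      else some (String.ofList [c], 1)          -- (?P<other>.)

-- re.sub's scan: copy chars until a match of _RX, splice in the callback's replacement
def pvSubLoop : List Char → String
  | [] => ""
  | c :: rest =>
    if c = '\\' then
      match pvMatchRepl rest with
      | some (rep, k) => rep ++ pvSubLoop (rest.drop k)
      | none => "\\" ++ pvSubLoop rest
    else String.ofList [c] ++ pvSubLoop rest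
termination_by s => s.length
decreasing_by
  all_goals simp

def decode_js_string_body_alt (text : String) : String :=
  if PySem.Str.isIn "\\" text = false then text
  else pvSubLoop text.toList

-- ===== PRECONDITION & SPEC =====

-- helpers of Pre_ (independent of both ports): hex digits, hex value and scalar check
def pvIsHexP (c : Char) : Bool :=
  ('0' ≤ c && c ≤ '9') || ('a' ≤ c && c ≤ 'f') || ('A' ≤ c && c ≤ 'F')

def pvScalarOKb (n : Nat) : Bool := decide (n < 55296 ∨ (57344 ≤ n ∧ n < 1114112))

-- a suffix starting a \u escape whose hex digits denote a non-scalar code point?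
def pvUEscOK (s : List Char) : Bool :=
  match s with
  | '\\' :: 'u' :: '{' :: r =>
    let content := r.takeWhile (fun ch => ch ≠ '}')
    if content.length < r.length ∧ content ≠ [] ∧ content.all pvIsHexP then
      pvScalarOKb (pvHexVal content)
    else true
  | '\\' :: 'u' :: h1 :: h2 :: h3 :: h4 :: _ =>
    if [h1, h2, h3, h4].all pvIsHexP then pvScalarOKb (pvHexVal [h1, h2, h3, h4]) else true
  | _ => true

-- Pre_ excludes texts containing a \u escape shape whose hex code denotes a lone surrogate or
-- exceeds 0x10FFFF: there Python A raises ValueError (chr) or returns a lone-surrogate string,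
-- which is not a sequence of Unicode scalar values and hence no Lean String. (It is conservative
-- about shape: such a pattern whose backslash is itself escaped is also excluded, though both
-- programs then return the same value.)
def Pre_decode_js_string_body (text : String) : Prop :=
  ∀ i, i < text.toList.length → pvUEscOK (text.toList.drop i) = true

instance (text : String) : Decidable (Pre_decode_js_string_body text) := by
  unfold Pre_decode_js_string_body; infer_instance

def pvWitness_decode_js_string_body : String := "a\\nb\\u0041\\x7f\\u{5c}"

def Spec_decode_js_string_body (text : String) (out : String) : Prop := out = decode_js_string_body_alt text
instance (text : String) (out : String) : Decidable (Spec_decode_js_string_body text out) := by unfold Spec_decode_js_string_body; infer_instance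

-- ===== CLAIM (what is proved, stated in full; the proofs are below) =====
def Claim_equal_decode_js_string_body : Prop := ∀ (text : String), Dom_decode_js_string_body text → Pre_decode_js_string_body text → Spec_decode_js_string_body text (decode_js_string_body text)

-- ===== LEMMAS AND PROOFS =====

theorem pv_mem_hex (c : Char) : (c ∈ pvHex) ↔ pvIsHexB c = true := by
  have h : pvIsHexB c = pvHex.contains c := rfl
  rw [h]
  simp

theorem pv_beq_single (k c : Char) : (String.ofList [k] == String.ofList [c]) = (k == c) := by
  by_cases h : k = c
  · subst h; simp
  · have h2 : ¬ String.ofList [k] = String.ofList [c] := by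
      intro hEq; exact h (by have := congrArg String.toList hEq; simpa using this)
    simp [h, h2]

theorem pv_escMap_eq (c : Char) : pvEscMap.get? (String.ofList [c]) = pvSimpleRepl c := by
  by_cases h1 : c = 'b'; · subst h1; decide
  by_cases h2 : c = 'f'; · subst h2; decide
  by_cases h3 : c = 'n'; · subst h3; decide
  by_cases h4 : c = 'r'; · subst h4; decide
  by_cases h5 : c = 't'; · subst h5; decide
  by_cases h6 : c = 'v'; · subst h6; decide
  by_cases h7 : c = '0'; · subst h7; decide
  by_cases h8 : c = '\\'; · subst h8; decide
  by_cases h9 : c = '\''; · subst h9; decide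
  by_cases h10 : c = '"'; · subst h10; decide
  by_cases h11 : c = '`'; · subst h11; decide
  rw [show pvSimpleRepl c = none by simp [pvSimpleRepl, h1,h2,h3,h4,h5,h6,h7,h8,h9,h10,h11]]
  have hitems : pvEscMap = PySem.Dict.mk
      [("b", "\x08"), ("f", "\x0C"), ("n", "\n"), ("r", "\x0D"),
       ("t", "\t"), ("v", "\x0B"), ("0", "\x00"), ("\\", "\\"),
       ("'", "'"), ("\"", "\""), ("`", "`")] := by decide
  have e1 : (("b" : String) == String.ofList [c]) = ('b' == c) := pv_beq_single 'b' c
  have e2 : (("f" : String) == String.ofList [c]) = ('f' == c) := pv_beq_single 'f' c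
  have e3 : (("n" : String) == String.ofList [c]) = ('n' == c) := pv_beq_single 'n' c
  have e4 : (("r" : String) == String.ofList [c]) = ('r' == c) := pv_beq_single 'r' c
  have e5 : (("t" : String) == String.ofList [c]) = ('t' == c) := pv_beq_single 't' c
  have e6 : (("v" : String) == String.ofList [c]) = ('v' == c) := pv_beq_single 'v' c
  have e7 : (("0" : String) == String.ofList [c]) = ('0' == c) := pv_beq_single '0' c
  have e8 : (("\\" : String) == String.ofList [c]) = ('\\' == c) := pv_beq_single '\\' c
  have e9 : (("'" : String) == String.ofList [c]) = ('\'' == c) := pv_beq_single '\'' c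
  have e10 : (("\"" : String) == String.ofList [c]) = ('"' == c) := pv_beq_single '"' c
  have e11 : (("`" : String) == String.ofList [c]) = ('`' == c) := pv_beq_single '`' c
  simp only [hitems, PySem.Dict.get?_mk_cons]
  simp [e1,e2,e3,e4,e5,e6,e7,e8,e9,e10,e11,
        Ne.symm h1, Ne.symm h2, Ne.symm h3, Ne.symm h4, Ne.symm h5, Ne.symm h6,
        Ne.symm h7, Ne.symm h8, Ne.symm h9, Ne.symm h10, Ne.symm h11]
  rfl

theorem pv_prefix_singleton (s : List Char) (c : Char) : [c] <+: s ↔ s[0]? = some c := by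
  cases s with
  | nil => simp
  | cons a s =>
    simp [List.cons_prefix_cons]
    exact eq_comm

theorem pv_prefix_singleton_drop (r : List Char) (c : Char) (j : Nat) :
    [c] <+: r.drop j ↔ r[j]? = some c := by
  rw [pv_prefix_singleton, List.getElem?_drop]
  simp

theorem pv_tw_take (p : Char → Bool) (r : List Char) :
    r.take (r.takeWhile p).length = r.takeWhile p := by
  induction r with
  | nil => simp
  | cons a r ih => cases h : p a <;> simp [List.takeWhile_cons, h, ih]

theorem pv_tw_first_fail (p : Char → Bool) (r : List Char) (h : (r.takeWhile p).length < r.length) :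
    ∃ x, r[(r.takeWhile p).length]? = some x ∧ p x = false := by
  induction r with
  | nil => simp at h
  | cons a r ih =>
    cases hp : p a
    · exact ⟨a, by simp [List.takeWhile_cons, hp], hp⟩
    · simp [List.takeWhile_cons, hp, Nat.succ_lt_succ_iff] at h
      obtain ⟨x, hx, hpx⟩ := ih h
      exact ⟨x, by simp [List.takeWhile_cons, hp, hx], hpx⟩

theorem pv_tw_before (p : Char → Bool) (r : List Char) :
    ∀ j < (r.takeWhile p).length, ∀ x, r[j]? = some x → p x = true := by
  induction r with
  | nil => simp
  | cons a r ih =>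
    intro j hj x hx
    cases hp : p a
    · simp [List.takeWhile_cons, hp] at hj
    · cases j with
      | zero => simp at hx; subst hx; exact hp
      | succ j =>
        simp [List.takeWhile_cons, hp, Nat.succ_lt_succ_iff] at hj
        exact ih j hj x (by simpa using hx)

theorem pv_tw_lt_of_mem (r : List Char) (c : Char) (h : c ∈ r) :
    (r.takeWhile (fun x => x ≠ c)).length < r.length := by
  by_contra h'
  have hle : (r.takeWhile (fun x => x ≠ c)).length ≤ r.length := (List.takeWhile_prefix _).length_le
  have heq : r.takeWhile (fun x => x ≠ c) = r := (List.takeWhile_prefix _).eq_of_length (by omega)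
  have := List.mem_takeWhile_imp (l := r) (p := fun x => x ≠ c) (by rw [heq]; exact h)
  simp at this

theorem pv_find_eq_tw (r : List Char) (c : Char) (h : (r.takeWhile (fun x => x ≠ c)).length < r.length) :
    PySem.Chars.find r [c] = ((r.takeWhile (fun x => x ≠ c)).length : Int) := by
  obtain ⟨x, hx, hpx⟩ := pv_tw_first_fail _ r h
  have hxc : x = c := by simpa using hpx
  subst hxc
  have hmem : x ∈ r := List.mem_of_getElem? hx
  have hinf : [x] <:+: r := (List.singleton_infix_iff x r).mpr hmem
  have h0 : 0 ≤ PySem.Chars.find r [x] := (PySem.Chars.find_nonneg_iff r [x]).mpr hinf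
  obtain ⟨hpre, hmin⟩ := PySem.Chars.find_spec (s := r) (sub := [x]) h0
  set n := (PySem.Chars.find r [x]).toNat with hn
  have hne : r[n]? = some x := (pv_prefix_singleton_drop r x n).mp hpre
  have hA : ¬ n < (r.takeWhile (fun y => y ≠ x)).length := by
    intro hlt
    have := pv_tw_before _ r n hlt x hne
    simp at this
  have hB : ¬ (r.takeWhile (fun y => y ≠ x)).length < n := by
    intro hlt
    exact hmin _ hlt ((pv_prefix_singleton_drop r x _).mpr hx)
  have : n = (r.takeWhile (fun y => y ≠ x)).length := by omega
  rw [← this, hn, Int.toNat_of_nonneg h0]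

theorem pv_find_neg (r : List Char) (c : Char)
    (h : ¬ (r.takeWhile (fun x => x ≠ c)).length < r.length) :
    PySem.Chars.find r [c] = -1 := by
  rw [PySem.Chars.find_eq_neg_one_iff, List.singleton_infix_iff]
  intro hmem
  exact h (pv_tw_lt_of_mem r c hmem)

theorem decode_js_string_body_step (l : List Char) (i : Nat) (c1 : Char) (t : List Char)
    (hd : l.drop (i + 1) = c1 :: t) :
    ∃ rep k, pvMatchRepl (c1 :: t) = some (rep, k) ∧
      pvDecodeOne l ((i : Int) + 1) l.length = (rep, (i : Int) + 1 + (k : Int)) ∧ 1 ≤ k := by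
  have hlen : i + 1 < l.length := by
    by_contra h
    rw [List.drop_eq_nil_of_le (by omega)] at hd
    simp at hd
  have ht : l.drop (i + 2) = t := by
    have h0 : (l.drop (i + 1)).tail = t := by rw [hd]; rfl
    rw [List.tail_drop] at h0
    exact h0
  have hlt : l.length = i + 2 + t.length := by
    have := congrArg List.length hd
    simp at this
    omega
  have hg : ∀ j : Nat, l[i + 2 + j]? = t[j]? := by
    intro j; rw [← ht, List.getElem?_drop]
  have e1 : ((i : Int) + 1) = ((i + 1 : Nat) : Int) := by push_cast; ring
  have e2 : ((i : Int) + 1 + 1) = ((i + 2 : Nat) : Int) := by push_cast; ring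
  have hget1 : PySem.List.pyGetD l ((i : Int) + 1) ' ' = c1 := by
    rw [e1, PySem.List.pyGetD_natCast, List.getD_eq_getElem?_getD]
    have h0 : l[i + 1]? = some c1 := by
      have h1 : (l.drop (i + 1))[0]? = some c1 := by rw [hd]; rfl
      rw [List.getElem?_drop] at h1
      simpa using h1
    simp [h0]
  have hnotend : ¬ ((l.length : Int) ≤ (i : Int) + 1) := by push_cast; omega
  -- unfold A one step and dispatch on the escape-map lookup = pvSimpleRepl
  rw [pvDecodeOne.eq_def, if_neg hnotend]
  simp only [hget1, pv_escMap_eq]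
  cases hs : pvSimpleRepl c1 with
  | some m =>
    refine ⟨m, 1, by simp [pvMatchRepl, hs], by push_cast; ring_nf, le_refl 1⟩
  | none =>
    by_cases hx : c1 = 'x'
    · -- \x
      subst hx
      by_cases h2 : 2 ≤ t.length
      · obtain ⟨a, b, t2, htt⟩ : ∃ a b t2, t = a :: b :: t2 := by
          rcases t with _ | ⟨a, _ | ⟨b, t2⟩⟩ <;> simp at h2 ⊢
        have hcondA : ((i : Int) + 1 + 1 + 1 < (l.length : Int)) := by push_cast; omega
        have hslice : PySem.List.slice l (some ((i : Int) + 1 + 1)) (some ((i : Int) + 1 + 1 + 2)) = [a, b] := by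
          rw [show ((i : Int) + 1 + 1 + 2) = ((i + 4 : Nat) : Int) by push_cast; ring, e2,
              PySem.List.slice_natCast, ht, htt,
              show i + 4 - (i + 2) = 2 by omega]
          rfl
        rw [if_pos ⟨rfl, hcondA⟩, hslice]
        by_cases hab : pvIsHexB a ∧ pvIsHexB b
        · refine ⟨String.ofList [Char.ofNat (pvHexVal [a, b])], 3,
            by simp [pvMatchRepl, hs, htt, hab.1, hab.2], ?_, by omega⟩
          rw [if_pos (by simp [(pv_mem_hex a).2 hab.1, (pv_mem_hex b).2 hab.2])]
          push_cast; ring_nf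
        · refine ⟨"x", 1, by simp [pvMatchRepl, hs, htt, hab], ?_, le_refl 1⟩
          rw [if_neg (by
            rintro ⟨-, hall⟩
            simp at hall
            exact hab ⟨(pv_mem_hex a).1 hall.1, (pv_mem_hex b).1 hall.2⟩)]
          push_cast; ring_nf
      · -- not enough room: A's x-guard fails, falls to the default branch; B's catch-all
        have hcondA : ¬ ('x' = 'x' ∧ (i : Int) + 1 + 1 + 1 < (l.length : Int)) := by
          push_neg
          intro _
          push_cast; omega
        rw [if_neg hcondA, if_neg (by decide), if_neg (by decide)]
        refine ⟨"x", 1, ?_, by push_cast; ring_nf, le_refl 1⟩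
        rcases t with _ | ⟨a, _ | ⟨b, t2⟩⟩ <;> simp_all [pvMatchRepl, hs] <;> omega
    · by_cases hu : c1 = 'u'
      · subst hu
        rw [if_neg (by simp [hx])]
        rw [if_pos rfl]
        rcases t with _ | ⟨a, r⟩
        · -- nothing after the 'u'
          simp only [List.length_nil] at hlt
          rw [if_neg (by rintro ⟨h, -⟩; push_cast at h; omega),
              if_neg (by push_cast; omega)]
          exact ⟨"u", 1, by simp [pvMatchRepl, hs], by push_cast; ring_nf, le_refl 1⟩
        · simp only [List.length_cons] at hlt
          have hgt : PySem.List.pyGetD l ((i : Int) + 1 + 1) ' ' = a := by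
            rw [e2, PySem.List.pyGetD_natCast, List.getD_eq_getElem?_getD]
            have := hg 0
            simp at this
            simp [this]
          by_cases hbr : a = '{'
          · subst hbr
            rw [if_pos ⟨by push_cast; omega, hgt⟩]
            have hr3 : l.drop (i + 3) = r := by
              have h0 : (l.drop (i + 2)).tail = r := by rw [ht]; rfl
              rw [List.tail_drop] at h0
              exact h0
            have hff : PySem.Chars.findFrom l ['}'] ((i : Int) + 1 + 1 + 1) none =
                (if PySem.Chars.find r ['}'] = -1 then -1
                 else ((i + 3 : Nat) : Int) + PySem.Chars.find r ['}']) := by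
              rw [show ((i : Int) + 1 + 1 + 1) = ((i + 3 : Nat) : Int) by push_cast; ring]
              rw [PySem.Chars.findFrom_natCast l ['}'] (i + 3) (by omega), hr3]
            set tw := r.takeWhile (fun x => x ≠ '}') with htw
            have hB : pvMatchRepl ('u' :: '{' :: r) =
                (if tw.length < r.length then
                  (if tw ≠ [] ∧ tw.all pvIsHexB then
                    some (String.ofList [Char.ofNat (pvHexVal tw)], tw.length + 3)
                  else some ("u", tw.length + 3))
                else some ("u", 1)) := by
              rw [htw]
              rfl
            by_cases hcl : tw.length < r.length
            · have hfind : PySem.Chars.find r ['}'] = (tw.length : Int) := pv_find_eq_tw r '}' hcl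
              rw [hff, hfind,
                  if_neg (show ¬ ((tw.length : Nat) : Int) = -1 by omega),
                  if_pos (show ((i + 3 : Nat) : Int) + ((tw.length : Nat) : Int) ≠ -1 by omega)]
              have hslice : PySem.List.slice l (some ((i : Int) + 1 + 1 + 1))
                  (some (((i + 3 : Nat) : Int) + (tw.length : Int))) = tw := by
                rw [show (((i + 3 : Nat) : Int) + (tw.length : Int)) = ((i + 3 + tw.length : Nat) : Int) by push_cast; ring,
                    show ((i : Int) + 1 + 1 + 1) = ((i + 3 : Nat) : Int) by push_cast; ring,
                    PySem.List.slice_natCast, hr3, show i + 3 + tw.length - (i + 3) = tw.length by omega]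
                exact pv_tw_take _ r
              rw [hslice]
              have hallEq : tw.all (fun ch => pvHex.contains ch) = tw.all pvIsHexB := rfl
              by_cases hv : tw ≠ [] ∧ tw.all pvIsHexB = true
              · refine ⟨String.ofList [Char.ofNat (pvHexVal tw)], tw.length + 3,
                  by rw [hB, if_pos hcl, if_pos hv], ?_, by omega⟩
                rw [if_pos (by rw [hallEq]; exact hv)]
                push_cast; ring_nf
              · refine ⟨"u", tw.length + 3,
                  by rw [hB, if_pos hcl, if_neg hv], ?_, by omega⟩
                rw [if_neg (by rw [hallEq]; exact hv)]
                push_cast; ring_nf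
            · -- no closing brace
              rw [hff, if_pos (pv_find_neg r '}' (by rwa [← htw])), if_neg (by simp)]
              exact ⟨"u", 1, by rw [hB, if_neg hcl], by push_cast; ring_nf, le_refl 1⟩
          · -- no '{': the four-hex-digit form
            rw [if_neg (by rintro ⟨-, hh⟩; rw [hgt] at hh; exact hbr hh)]
            by_cases h4 : 3 ≤ r.length
            · obtain ⟨b, c, d, r2, hrr⟩ : ∃ b c d r2, r = b :: c :: d :: r2 := by
                rcases r with _ | ⟨b, _ | ⟨c, _ | ⟨d, r2⟩⟩⟩ <;> simp at h4 ⊢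
              rw [if_pos (by push_cast; omega)]
              have hslice : PySem.List.slice l (some ((i : Int) + 1 + 1))
                  (some ((i : Int) + 1 + 1 + 4)) = [a, b, c, d] := by
                rw [show ((i : Int) + 1 + 1 + 4) = ((i + 6 : Nat) : Int) by push_cast; ring, e2,
                    PySem.List.slice_natCast, ht, hrr,
                    show i + 6 - (i + 2) = 4 by omega]
                rfl
              rw [hslice]
              by_cases hv : pvIsHexB a ∧ pvIsHexB b ∧ pvIsHexB c ∧ pvIsHexB d
              · refine ⟨String.ofList [Char.ofNat (pvHexVal [a, b, c, d])], 5,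
                  by simp [pvMatchRepl, hs, hrr, hbr, hv.1, hv.2.1, hv.2.2.1, hv.2.2.2], ?_, by omega⟩
                rw [if_pos (by
                  refine ⟨rfl, ?_⟩
                  simp [(pv_mem_hex a).2 hv.1, (pv_mem_hex b).2 hv.2.1,
                        (pv_mem_hex c).2 hv.2.2.1, (pv_mem_hex d).2 hv.2.2.2])]
                push_cast; ring_nf
              · refine ⟨"u", 1, by simp [pvMatchRepl, hs, hrr, hbr, hv], ?_, le_refl 1⟩
                rw [if_neg (by
                  rintro ⟨-, hall⟩
                  simp at hall
                  exact hv ⟨(pv_mem_hex a).1 hall.1, (pv_mem_hex b).1 hall.2.1,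
                            (pv_mem_hex c).1 hall.2.2.1, (pv_mem_hex d).1 hall.2.2.2⟩)]
                push_cast; ring_nf
            · -- fewer than four chars after the 'u'
              rw [if_neg (by push_cast; omega)]
              refine ⟨"u", 1, ?_, by push_cast; ring_nf, le_refl 1⟩
              rcases r with _ | ⟨b, _ | ⟨c, _ | ⟨d, r2⟩⟩⟩ <;> simp_all [pvMatchRepl, hs, hbr]
      · by_cases hr : c1 = '\x0D'
        · -- \r : line continuation
          subst hr
          rw [if_neg (by simp [hx]), if_neg (by decide), if_pos (Or.inl rfl)]
          rcases t with _ | ⟨a, t1⟩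
          · simp only [List.length_nil] at hlt
            refine ⟨"", 1, by simp [pvMatchRepl, hs], ?_, le_refl 1⟩
            rw [if_neg (by rintro ⟨-, h, -⟩; push_cast at h; omega)]
            push_cast; ring_nf
          · simp only [List.length_cons] at hlt
            have hgt : PySem.List.pyGetD l ((i : Int) + 1 + 1) ' ' = a := by
              rw [e2, PySem.List.pyGetD_natCast, List.getD_eq_getElem?_getD]
              have := hg 0
              simp at this
              simp [this]
            by_cases ha : a = '\n'
            · subst ha
              refine ⟨"", 2, by simp [pvMatchRepl, hs], ?_, by omega⟩
              rw [if_pos ⟨rfl, by push_cast; omega, hgt⟩]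
              push_cast; ring_nf
            · refine ⟨"", 1, by simp [pvMatchRepl, hs, ha], ?_, le_refl 1⟩
              rw [if_neg (by rintro ⟨-, -, hh⟩; rw [hgt] at hh; exact ha hh)]
              push_cast; ring_nf
        · by_cases hn : c1 = '\n'
          · subst hn
            rw [if_neg (by simp [hx]), if_neg (by decide), if_pos (Or.inr rfl)]
            refine ⟨"", 1, by simp [pvMatchRepl, hs], ?_, le_refl 1⟩
            rw [if_neg (by rintro ⟨hh, -⟩; exact absurd hh (by decide))]
            push_cast; ring_nf
          · -- default: drop the backslash, keep the char
            rw [if_neg (by simp [hx]), if_neg hu, if_neg (by simp [hr, hn])]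
            refine ⟨String.ofList [c1], 1, by simp [pvMatchRepl, hs, hr, hn, hx, hu], ?_, le_refl 1⟩
            push_cast; ring_nf

theorem pv_join_append (ps : List String) (s : String) :
    String.join (ps ++ [s]) = String.join ps ++ s := by
  induction ps with
  | nil => simp [String.join]
  | cons p ps ih => simp [String.join]

theorem decode_js_string_body_loop (l : List Char) : ∀ (fuel i : Nat) (parts : List String),
    l.length - i ≤ fuel →
    String.join (pvLoopA l (l.length : Int) fuel (i : Int) parts) =
      String.join parts ++ pvSubLoop (l.drop i) := by
  intro fuel
  induction fuel with
  | zero =>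
    intro i parts hf
    have hle : l.length ≤ i := by omega
    simp [pvLoopA, List.drop_eq_nil_of_le hle, pvSubLoop]
  | succ fuel ih =>
    intro i parts hf
    by_cases hi : i < l.length
    · have hget : PySem.List.pyGetD l (i : Int) ' ' = l[i] := by
        simp [PySem.List.pyGetD_natCast, List.getD_eq_getElem?_getD, List.getElem?_eq_getElem hi]
      have hdrop : l.drop i = l[i] :: l.drop (i + 1) := List.drop_eq_getElem_cons hi
      by_cases hc : l[i] = '\\'
      · by_cases h2 : i + 1 < l.length
        · -- real escape: use the step lemma
          obtain ⟨c1, t, hd⟩ : ∃ c1 t, l.drop (i + 1) = c1 :: t := by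
            rcases h3 : l.drop (i + 1) with _ | ⟨c1, t⟩
            · exfalso; have := List.drop_eq_nil_iff.mp h3; omega
            · exact ⟨c1, t, rfl⟩
          obtain ⟨rep, k, hm, hdec, hk1⟩ := decode_js_string_body_step l i c1 t hd
          have hAcond : ¬((l[i] ≠ '\\') ∨ ((l.length : Int) ≤ (i : Int) + 1)) := by
            simp only [not_or, not_le, ne_eq, not_not]
            exact ⟨hc, by exact_mod_cast h2⟩
          have hstep : pvLoopA l (l.length : Int) (fuel + 1) (i : Int) parts =
              pvLoopA l (l.length : Int) fuel ((i : Int) + 1 + (k : Int))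
                (if rep ≠ "" then parts ++ [rep] else parts) := by
            rw [pvLoopA]
            simp only [hget, hdec]
            rw [if_pos (by exact_mod_cast hi), if_neg hAcond]
          have hcast : (i : Int) + 1 + (k : Int) = ((i + 1 + k : Nat) : Int) := by push_cast; ring
          rw [hstep, hcast, ih (i + 1 + k) _ (by omega)]
          have hdk : (c1 :: t).drop k = l.drop (i + 1 + k) := by
            rw [← hd, List.drop_drop]
          have hB : pvSubLoop (l.drop i) = rep ++ pvSubLoop (l.drop (i + 1 + k)) := by
            rw [hdrop, hd, ← hdk]
            rw [pvSubLoop]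
            simp [hc, hm]
          rw [hB]
          by_cases hrep : rep = ""
          · simp [hrep]
          · rw [if_pos hrep, pv_join_append, String.append_assoc]
        · -- trailing backslash: c = '\\' but i+1 ≥ length
          have ht : l.drop (i + 1) = [] := List.drop_eq_nil_of_le (by omega)
          have hstep : pvLoopA l (l.length : Int) (fuel + 1) (i : Int) parts =
              pvLoopA l (l.length : Int) fuel ((i : Int) + 1) (parts ++ [String.ofList [l[i]]]) := by
            rw [pvLoopA]
            rw [if_pos (by exact_mod_cast hi), if_pos (Or.inr (by exact_mod_cast (by omega : l.length ≤ i + 1)))]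
            simp only [hget]
          rw [hstep]
          have hcast : (i : Int) + 1 = ((i + 1 : Nat) : Int) := by push_cast; ring
          rw [hcast, ih (i + 1) _ (by omega), pv_join_append]
          rw [hdrop, ht, pvSubLoop]
          simp [hc, pvMatchRepl, pvSubLoop, String.append_assoc]
      · -- ordinary character
        have hstep : pvLoopA l (l.length : Int) (fuel + 1) (i : Int) parts =
            pvLoopA l (l.length : Int) fuel ((i : Int) + 1) (parts ++ [String.ofList [l[i]]]) := by
          rw [pvLoopA]
          rw [if_pos (by exact_mod_cast hi), if_pos (Or.inl (by simp [hget, hc]))]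
          simp only [hget]
        rw [hstep]
        have hcast : (i : Int) + 1 = ((i + 1 : Nat) : Int) := by push_cast; ring
        rw [hcast, ih (i + 1) _ (by omega), pv_join_append]
        rw [hdrop, pvSubLoop]
        simp [hc, String.append_assoc]
    · have hle : l.length ≤ i := by omega
      have : ¬((i : Int) < (l.length : Int)) := by exact_mod_cast not_lt.mpr hle
      rw [pvLoopA, if_neg this]
      simp [List.drop_eq_nil_of_le hle, pvSubLoop]

-- ===== VERDICT (by name: the statement is the Claim_ definition above) =====
theorem decode_js_string_body_spec : Claim_equal_decode_js_string_body := by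
  intro text _ _
  unfold Spec_decode_js_string_body decode_js_string_body decode_js_string_body_alt
  by_cases h : PySem.Chars.isIn ['\\'] text.toList = false
  · simp [h]
  · simp [h]
    simpa using decode_js_string_body_loop text.toList text.toList.length 0 [] (by omega)
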